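-- pv_equiv track=rewrite | github.com/parashardhapola/nabo | nabo/_io.py | fix_dup_names
-- ===== SOURCE A (Python) =====
-- from collections import Counter
--
-- def fix_dup_names(names):
--     """
--
--     :param names:
--     :return:
--     """
--     names_upper = [x.upper() for x in names]
--     dup_names = {item: 0 for item, count in
--                  Counter(names_upper).items() if count > 1}
--     renamed_names = []
--     for name in names_upper:
--         if name in dup_names:
--             dup_names[name] += 1
--             name = name + '_' + str(dup_names[name])
--         renamed_names.append(str(name))
--     return renamed_names
-- ===== SOURCE B (Python) =====
-- def fix_dup_names(names):
--     """
--
--     :param names: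
--     :return:
--     """
--     upper = [x.upper() for x in names]
--     positions = {}
--     for i, n in enumerate(upper):
--         positions.setdefault(n, []).append(i)
--     out = [""] * len(upper)
--     for name, idxs in positions.items():
--         if len(idxs) > 1:
--             for rank, i in enumerate(idxs, 1):
--                 out[i] = name + '_' + str(rank)
--         else:
--             out[idxs[0]] = name
--     return out
-- ===== Notes on version B (the rewrite author's own statement) =====
-- stated objective: alternative
-- what changed: Replaces the Counter-plus-running-counter single pass by an index table (name -> ordered positions) built once, followed by a scatter that writes name_rank at each position of every duplicated group.
import Mathlib
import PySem

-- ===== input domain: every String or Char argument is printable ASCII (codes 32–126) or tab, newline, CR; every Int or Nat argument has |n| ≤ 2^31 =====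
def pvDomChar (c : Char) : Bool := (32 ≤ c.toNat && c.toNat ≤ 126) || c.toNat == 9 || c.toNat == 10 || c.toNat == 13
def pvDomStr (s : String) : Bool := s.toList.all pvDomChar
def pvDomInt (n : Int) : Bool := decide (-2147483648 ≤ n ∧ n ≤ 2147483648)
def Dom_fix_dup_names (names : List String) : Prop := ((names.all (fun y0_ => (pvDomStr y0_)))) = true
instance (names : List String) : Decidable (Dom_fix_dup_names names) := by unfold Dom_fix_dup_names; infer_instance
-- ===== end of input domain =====

-- B uppercases once, builds a positions table per name, then scatters name_rank into a
-- preallocated result; A keeps a running counter while appending. Same values, different structure.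

-- ===== PORT A =====
def fix_dup_names (names : List String) : List String :=
  let namesUpper := names.map PySem.Str.upper
  let dupNames : PySem.Dict String Int :=
    PySem.Dict.mk
      (((PySem.Dict.counter namesUpper).items.filter (fun p => 1 < p.2)).map
        (fun p => (p.1, (0 : Int))))
  (namesUpper.foldl
    (fun (st : PySem.Dict String Int × List String) name =>
      if st.1.contains name then
        let v := st.1.getD name 0 + 1
        (st.1.insert name v, st.2 ++ [name ++ "_" ++ PySem.Int.toStr v])
      else (st.1, st.2 ++ [name]))
    (dupNames, [])).2

-- ===== PORT B =====
def fix_dup_names_alt (names : List String) : List String :=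
  let upper := names.map PySem.Str.upper
  let positions : PySem.Dict String (List Int) :=
    (PySem.List.enumerate upper 0).foldl
      (fun d p => d.modify p.2 [] (fun xs => xs ++ [p.1])) PySem.Dict.empty
  positions.items.foldl
    (fun out p =>
      if 1 < p.2.length then
        (PySem.List.enumerate p.2 1).foldl
          (fun out q => PySem.List.pySetD out q.2 (p.1 ++ "_" ++ PySem.Int.toStr q.1)) out
      else
        match p.2 with
        | i :: _ => PySem.List.pySetD out i p.1
        | [] => out)
    (List.replicate upper.length "")

-- ===== PRECONDITION & SPEC =====
def Spec_fix_dup_names (names : List String) (out : List String) : Prop := out = fix_dup_names_alt names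
instance (names : List String) (out : List String) : Decidable (Spec_fix_dup_names names out) := by unfold Spec_fix_dup_names; infer_instance

-- ===== CLAIM (what is proved, stated in full; the proofs are below) =====
def Claim_equal_fix_dup_names : Prop := ∀ (names : List String), Dom_fix_dup_names names → Spec_fix_dup_names names (fix_dup_names names)

-- ===== LEMMAS AND PROOFS =====

/-- The common reference value at index `j` of the uppercased list `u`. -/
def specEl (u : List String) (j : Nat) : String :=
  let nm := u.getD j ""
  if 1 < u.count nm then nm ++ "_" ++ PySem.Int.toStr (((u.take (j+1)).count nm : Nat) : Int)
  else nm

def spec (u : List String) : List String := (List.range u.length).map (specEl u)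

-- getD of the literal zero-dict is always 0
theorem getD_mk0 (L : List String) (k : String) :
    (PySem.Dict.mk (L.map (fun x => (x, (0 : Int))))).getD k 0 = 0 := by
  induction L with
  | nil => simp [PySem.Dict.getD_eq_get?_getD, PySem.Dict.get?]
  | cons x L ih =>
    simp only [List.map_cons]
    rw [PySem.Dict.getD_eq_get?_getD, PySem.Dict.get?_mk_cons]
    by_cases h : x = k
    · simp [h]
    · simp only [beq_iff_eq, h, if_false]
      rw [← PySem.Dict.getD_eq_get?_getD]
      exact ih

theorem contains_mk0 (L : List String) (k : String) :
    (PySem.Dict.mk (L.map (fun x => (x, (0 : Int))))).contains k = decide (k ∈ L) := by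
  induction L with
  | nil => simp [PySem.Dict.contains_mk]
  | cons x L ih =>
    simp only [List.map_cons, PySem.Dict.contains_mk, List.any_cons] at *
    by_cases h : x = k
    · simp [h]
    · have : (x == k) = false := by simp [h]
      simp [this, ih, Ne.symm h]

theorem A_loop (u : List String) :
    ∀ (s p : List String) (d : PySem.Dict String Int) (acc : List String),
    u = p ++ s →
    (∀ k, d.contains k = decide (1 < u.count k)) →
    (∀ k, 1 < u.count k → d.getD k 0 = (p.count k : Int)) →
    (s.foldl
      (fun (st : PySem.Dict String Int × List String) name =>
        if st.1.contains name then
          (st.1.insert name (st.1.getD name 0 + 1),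
           st.2 ++ [name ++ "_" ++ PySem.Int.toStr (st.1.getD name 0 + 1)])
        else (st.1, st.2 ++ [name]))
      (d, acc)).2
    = acc ++ (List.range s.length).map (fun j => specEl u (p.length + j)) := by
  intro s
  induction s with
  | nil => intro p d acc _ _ _; simp
  | cons nm s' ih =>
    intro p d acc hu hc hd
    have hnm : u.getD p.length "" = nm := by
      subst hu
      rw [List.getD_eq_getElem?_getD, List.getElem?_append_right (le_refl p.length)]
      simp
    have htake : u.take (p.length + 1) = p ++ [nm] := by
      subst hu
      rw [List.take_append]
      simp [List.take_of_length_le (le_of_lt (Nat.lt_succ_self _))]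
    simp only [List.foldl_cons]
    rw [hc nm]
    by_cases hcnt : 1 < u.count nm
    · simp only [hcnt, decide_true, if_true]
      have hv : d.getD nm 0 + 1 = ((p.count nm + 1 : Nat) : Int) := by
        rw [hd nm hcnt]; push_cast; ring
      rw [ih (p ++ [nm]) _ _ (by rw [hu, List.append_assoc]; rfl)
            (by intro k
                rw [PySem.Dict.contains_insert, hc k]
                by_cases hk : k = nm <;> simp [hk, hcnt])
            (by intro k hk
                rw [PySem.Dict.getD_insert]
                by_cases hkn : k = nm
                · subst hkn; rw [if_pos rfl, hv]; simp
                · rw [if_neg hkn, hd k hk]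
                  have : List.count k [nm] = 0 := by
                    simp [List.count_singleton, beq_iff_eq, Ne.symm hkn]
                  simp [List.count_append, this])]
      have hel : specEl u p.length = nm ++ "_" ++ PySem.Int.toStr (d.getD nm 0 + 1) := by
        simp only [specEl, hnm, hcnt, if_true, htake, hv]
        simp [List.count_append]
      rw [List.length_cons, List.range_succ_eq_map, List.map_cons, List.map_map,
          Nat.add_zero, hel]
      simp only [List.append_assoc, List.singleton_append, List.length_append,
        List.length_cons, List.length_nil]
      congr 2
      apply List.map_congr_left
      intro j _
      simp only [Function.comp_apply]
      congr 1
      omega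
    · simp only [hcnt, decide_false, Bool.false_eq_true, if_false]
      rw [ih (p ++ [nm]) _ _ (by rw [hu, List.append_assoc]; rfl) hc
            (by intro k hk
                rw [hd k hk]
                have hkn : k ≠ nm := fun h => hcnt (h ▸ hk)
                have : List.count k [nm] = 0 := by
                  simp [List.count_singleton, beq_iff_eq, Ne.symm hkn]
                simp [List.count_append, this])]
      have hel : specEl u p.length = nm := by simp only [specEl, hnm, hcnt, if_false]
      rw [List.length_cons, List.range_succ_eq_map, List.map_cons, List.map_map,
          Nat.add_zero, hel]
      simp only [List.append_assoc, List.singleton_append, List.length_append,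
        List.length_cons, List.length_nil]
      congr 2
      apply List.map_congr_left
      intro j _
      simp only [Function.comp_apply]
      congr 1
      omega


theorem A_eq_spec (names : List String) :
    fix_dup_names names = spec (names.map PySem.Str.upper) := by
  set u := names.map PySem.Str.upper with hu
  have hitems : ((PySem.Dict.counter u).items.filter (fun p => 1 < p.2)).map
      (fun p => (p.1, (0 : Int)))
      = ((PySem.Set.ofList u).filter (fun k => decide (1 < (u.count k : Int)))).map
          (fun k => (k, (0 : Int))) := by
    rw [PySem.Dict.items_counter, List.filter_map, List.map_map]
    rfl
  have hL : ∀ k, (k ∈ (PySem.Set.ofList u).filter (fun k => decide (1 < (u.count k : Int))))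
      ↔ 1 < u.count k := by
    intro k
    simp only [List.mem_filter, PySem.Set.mem_ofList, decide_eq_true_eq]
    constructor
    · intro h; exact_mod_cast h.2
    · intro h
      refine ⟨List.count_pos_iff.mp (by omega), by exact_mod_cast h⟩
  show (u.foldl _ (PySem.Dict.mk _, [])).2 = spec u
  rw [A_loop u u [] _ [] (by simp)
        (by intro k
            rw [hitems, contains_mk0]
            exact decide_eq_decide.mpr (hL k))
        (by intro k hk
            rw [hitems, getD_mk0]
            simp)]
  simp [spec]

def IdxsFrom (s : Int) (u : List String) (k : String) : List Int :=
  ((PySem.List.enumerate u s).filter (fun p => p.2 == k)).map (·.1)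

theorem mem_IdxsFrom (s : Int) (u : List String) (k : String) (x : Int) :
    x ∈ IdxsFrom s u k ↔ ∃ j : Nat, j < u.length ∧ u.getD j "" = k ∧ x = s + j := by
  simp only [IdxsFrom, List.mem_map, List.mem_filter, PySem.List.mem_enumerate_iff]
  constructor
  · rintro ⟨⟨i, nm⟩, ⟨⟨j, hj, hp⟩, hk⟩, hx⟩
    obtain ⟨h1, h2⟩ := Prod.mk.injEq .. ▸ hp
    refine ⟨j, hj, ?_, ?_⟩
    · rw [List.getD_eq_getElem?_getD, List.getElem?_eq_getElem hj]
      simpa [← h2] using (beq_iff_eq.mp hk)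
    · simp [← hx, h1]
  · rintro ⟨j, hj, hk, hx⟩
    refine ⟨(s + j, u[j]), ⟨⟨j, hj, rfl⟩, ?_⟩, by simp [hx]⟩
    rw [List.getD_eq_getElem?_getD, List.getElem?_eq_getElem hj] at hk
    simpa using hk

theorem length_IdxsFrom (s : Int) (u : List String) (k : String) :
    (IdxsFrom s u k).length = u.count k := by
  induction u generalizing s with
  | nil => simp [IdxsFrom, PySem.List.enumerate_nil]
  | cons nm u' ih =>
    simp only [IdxsFrom, PySem.List.enumerate_cons, List.filter_cons] at *
    by_cases h : nm = k
    · simp [h, List.count_cons, ih (s+1)]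
    · have : (nm == k) = false := by simp [h]
      simp [this, List.count_cons, ih (s+1), h, Ne.symm h]

theorem nodup_IdxsFrom (s : Int) (u : List String) (k : String) :
    (IdxsFrom s u k).Nodup := by
  have hp : ((PySem.List.enumerate u s).filter (fun p => p.2 == k)).Pairwise
      (fun p q => p.1 < q.1) :=
    (PySem.List.pairwise_lt_enumerate u s).filter _
  have : (IdxsFrom s u k).Pairwise (· < ·) := List.pairwise_map.mpr hp
  exact this.imp ne_of_lt

theorem idxOf_IdxsFrom (u : List String) (k : String) :
    ∀ (s : Int) (j : Nat), j < u.length → u.getD j "" = k →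
    (IdxsFrom s u k).idxOf (s + j) = (u.take j).count k := by
  induction u with
  | nil => intro s j hj _; simp at hj
  | cons nm u' ih =>
    intro s j hj hk
    simp only [IdxsFrom, PySem.List.enumerate_cons, List.filter_cons]
    by_cases h : nm = k
    · have hb : (nm == k) = true := by simp [h]
      simp only [hb, if_true, List.map_cons]
      cases j with
      | zero => simp [List.idxOf_cons]
      | succ j' =>
        have hne : ((s == s + (j' + 1 : Nat) : Bool)) = false := by
          simp only [beq_eq_false_iff_ne, ne_eq]
          push_cast
          omega
        rw [List.idxOf_cons, hne]
        simp only [cond_false]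
        have := ih (s + 1) j' (by simpa using hj) (by simpa using hk)
        rw [show (s + (j' + 1 : Nat) : Int) = (s + 1) + j' by push_cast; ring]
        rw [IdxsFrom] at this
        rw [this]
        simp [List.count_cons, h]
    · have hb : (nm == k) = false := by simp [h]
      simp only [hb, Bool.false_eq_true, if_false]
      cases j with
      | zero =>
        simp only [List.getD_cons_zero] at hk
        exact absurd hk h
      | succ j' =>
        have := ih (s + 1) j' (by simpa using hj) (by simpa using hk)
        rw [show (s + (j' + 1 : Nat) : Int) = (s + 1) + j' by push_cast; ring]
        rw [IdxsFrom] at this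
        rw [this]
        simp [List.count_cons, h, Ne.symm h]

theorem getD_posFold :
    ∀ (l : List (Int × String)) (d : PySem.Dict String (List Int)) (k : String),
    (l.foldl (fun d p => d.modify p.2 [] (fun xs => xs ++ [p.1])) d).getD k []
    = d.getD k [] ++ ((l.filter (fun p => p.2 == k)).map (·.1)) := by
  intro l
  induction l with
  | nil => simp
  | cons q l' ih =>
    intro d k
    simp only [List.foldl_cons, List.filter_cons]
    rw [ih]
    by_cases h : q.2 = k
    · have hb : (q.2 == k) = true := by simp [h]
      rw [PySem.Dict.getD_modify]
      simp [h, hb]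
    · have hb : (q.2 == k) = false := by simp [h]
      rw [PySem.Dict.getD_modify]
      simp [Ne.symm h, hb]

theorem keys_posFold (u : List String) :
    ((PySem.List.enumerate u 0).foldl
      (fun d p => d.modify p.2 [] (fun xs => xs ++ [p.1]))
      (PySem.Dict.empty : PySem.Dict String (List Int))).keys = PySem.Set.ofList u := by
  rw [PySem.Dict.keys_foldl_modify_key]
  rw [PySem.Dict.keys_empty, PySem.List.map_snd_enumerate]
  exact PySem.Set.update_nil_left u

theorem items_posFold (u : List String) :
    ((PySem.List.enumerate u 0).foldl
      (fun d p => d.modify p.2 [] (fun xs => xs ++ [p.1]))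
      (PySem.Dict.empty : PySem.Dict String (List Int))).items
    = (PySem.Set.ofList u).map (fun k => (k, IdxsFrom 0 u k)) := by
  rw [PySem.Dict.items_eq_map_keys _ (by rw [keys_posFold]; exact PySem.Set.nodup_ofList u) []]
  rw [keys_posFold]
  apply List.map_congr_left
  intro k _
  rw [getD_posFold]
  simp [IdxsFrom, PySem.Dict.getD_empty]

theorem setsFold (f : Int → String) :
    ∀ (l : List Int) (s : Int) (o : List String), l.Nodup → (∀ x ∈ l, 0 ≤ x) →
    ∀ j : Nat,
    ((PySem.List.enumerate l s).foldl (fun o q => PySem.List.pySetD o q.2 (f q.1)) o)[j]?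
    = if (j : Int) ∈ l then
        (if j < o.length then some (f (s + (l.idxOf (j : Int) : Int))) else none)
      else o[j]? := by
  intro l
  induction l with
  | nil => intro s o _ _ j; simp [PySem.List.enumerate_nil]
  | cons x l' ih =>
    intro s o hnd hpos j
    simp only [PySem.List.enumerate_cons, List.foldl_cons]
    have hx : (0 : Int) ≤ x := hpos x (List.mem_cons_self ..)
    have hset : PySem.List.pySetD o x (f s) = o.set x.toNat (f s) :=
      PySem.List.pySetD_of_nonneg o (f s) hx
    rw [hset, ih (s+1) _ hnd.of_cons (fun y hy => hpos y (List.mem_cons_of_mem _ hy))]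
    have hlen : (o.set x.toNat (f s)).length = o.length := by simp
    by_cases hjx : (j : Int) = x
    · have hj1 : j = x.toNat := by omega
      have hnotin : (j : Int) ∉ l' := by rw [hjx]; exact (List.nodup_cons.mp hnd).1
      rw [if_neg hnotin, if_pos (by simp [hjx])]
      have hidx : List.idxOf (j : Int) (x :: l') = 0 := by
        simp [List.idxOf_cons, hjx.symm]
      rw [hidx]
      rw [List.getElem?_set]
      rw [if_pos hj1.symm]
      by_cases hjo : x.toNat < o.length
      · rw [if_pos hjo, if_pos (by omega)]
        simp
      · rw [if_neg hjo, if_neg (by omega)]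
    · have hne : x.toNat ≠ j := by omega
      have hidx : List.idxOf (j : Int) (x :: l') = List.idxOf (j : Int) l' + 1 := by
        rw [List.idxOf_cons]
        have : ((x == (j : Int)) : Bool) = false := by
          simp only [beq_eq_false_iff_ne, ne_eq]
          omega
        simp [this]
      by_cases hjl : (j : Int) ∈ l'
      · rw [if_pos hjl, if_pos (List.mem_cons_of_mem _ hjl), hidx, hlen]
        congr 2
        push_cast
        ring
      · rw [if_neg hjl, if_neg (by simp [hjx, hjl]), List.getElem?_set_ne hne]

theorem mem_IdxsFrom0 (u : List String) (k : String) (j : Nat) (hj : j < u.length) :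
    ((j : Int) ∈ IdxsFrom 0 u k) ↔ u.getD j "" = k := by
  rw [mem_IdxsFrom]
  constructor
  · rintro ⟨j', hj', hk', hx⟩
    have : j = j' := by omega
    rwa [this]
  · intro h
    exact ⟨j, hj, h, by simp⟩

theorem nonneg_IdxsFrom0 (u : List String) (k : String) :
    ∀ x ∈ IdxsFrom 0 u k, 0 ≤ x := by
  intro x hx
  obtain ⟨j, _, _, hxe⟩ := (mem_IdxsFrom 0 u k x).mp hx
  omega

theorem length_foldl_pySetD (g : Int → String) :
    ∀ (L : List (Int × Int)) (o : List String),
    (L.foldl (fun o q => PySem.List.pySetD o q.2 (g q.1)) o).length = o.length := by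
  intro L
  induction L with
  | nil => intro o; rfl
  | cons q L' ih => intro o; rw [List.foldl_cons, ih]; simp [PySem.List.length_pySetD]

theorem group_step (u : List String) (k : String) (hk : k ∈ u) (o : List String)
    (ho : o.length = u.length) (j : Nat) (hj : j < u.length) :
    (if 1 < (IdxsFrom 0 u k).length then
       (PySem.List.enumerate (IdxsFrom 0 u k) 1).foldl
         (fun o q => PySem.List.pySetD o q.2 (k ++ "_" ++ PySem.Int.toStr q.1)) o
     else
       match IdxsFrom 0 u k with
       | i :: _ => PySem.List.pySetD o i k
       | [] => o)[j]?
    = if u.getD j "" = k then some (specEl u j) else o[j]? := by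
  have hcnt : (IdxsFrom 0 u k).length = u.count k := length_IdxsFrom 0 u k
  by_cases h1 : 1 < (IdxsFrom 0 u k).length
  · rw [if_pos h1]
    rw [setsFold (fun r => k ++ "_" ++ PySem.Int.toStr r) (IdxsFrom 0 u k) 1 o (nodup_IdxsFrom 0 u k) (nonneg_IdxsFrom0 u k)]
    by_cases hjk : u.getD j "" = k
    · rw [if_pos ((mem_IdxsFrom0 u k j hj).mpr hjk), if_pos (by omega), if_pos hjk]
      have hidx : (IdxsFrom 0 u k).idxOf (j : Int) = (u.take j).count k := by
        have := idxOf_IdxsFrom u k 0 j hj hjk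
        simpa using this
      rw [hidx]
      have hjk' : u[j] = k := by
        rw [List.getD_eq_getElem?_getD, List.getElem?_eq_getElem hj] at hjk
        simpa using hjk
      have hgt : 1 < u.count k := by omega
      have htake : (u.take (j+1)).count k = (u.take j).count k + 1 := by
        rw [List.take_add_one, List.getElem?_eq_getElem hj]
        simp [List.count_append, hjk']
      simp only [specEl, hjk, hgt, if_true]
      rw [htake]
      congr 3
      push_cast
      ring
    · rw [if_neg (fun hm => hjk ((mem_IdxsFrom0 u k j hj).mp hm)), if_neg hjk]
  · rw [if_neg h1]
    have hpos : 0 < u.count k := List.count_pos_iff.mpr hk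
    have hlen1 : (IdxsFrom 0 u k).length = 1 := by omega
    obtain ⟨i, hi⟩ := List.length_eq_one_iff.mp hlen1
    obtain ⟨j₀, hj₀, hkj₀, hij₀⟩ := (mem_IdxsFrom 0 u k i).mp (by rw [hi]; exact List.mem_cons_self ..)
    have hi0 : i = (j₀ : Int) := by omega
    rw [hi]
    have hred : (match (i :: ([] : List Int)) with
       | i :: _ => PySem.List.pySetD o i k
       | [] => o) = PySem.List.pySetD o i k := rfl
    rw [hred, PySem.List.pySetD_of_nonneg o k (by omega : (0:Int) ≤ i)]
    by_cases hjk : u.getD j "" = k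
    · have hmem : (j : Int) ∈ IdxsFrom 0 u k := (mem_IdxsFrom0 u k j hj).mpr hjk
      rw [hi] at hmem
      have hji : j = i.toNat := by
        simp only [List.mem_singleton] at hmem
        omega
      rw [← hji, List.getElem?_set_self (by omega), if_pos hjk]
      have hcnt1 : ¬ 1 < u.count k := by omega
      simp only [specEl, List.getD_eq_getElem?_getD] at hjk ⊢
      rw [hjk, if_neg hcnt1]
    · have hne : i.toNat ≠ j := by
        intro h
        apply hjk
        rw [← h]
        have : i.toNat = j₀ := by omega
        rw [this]
        exact hkj₀
      rw [List.getElem?_set_ne hne, if_neg hjk]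

theorem stepB_length (o : List String) (p : String × List Int) :
    (if 1 < p.2.length then
       (PySem.List.enumerate p.2 1).foldl
         (fun out q => PySem.List.pySetD out q.2 (p.1 ++ "_" ++ PySem.Int.toStr q.1)) o
     else
       match p.2 with
       | i :: _ => PySem.List.pySetD o i p.1
       | [] => o).length = o.length := by
  by_cases h : 1 < p.2.length
  · rw [if_pos h]
    exact length_foldl_pySetD (fun r => p.1 ++ "_" ++ PySem.Int.toStr r) _ o
  · rw [if_neg h]
    cases p.2 with
    | nil => rfl
    | cons i t => simp [PySem.List.length_pySetD]

theorem scatter (u : List String) :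
    ∀ (K S o : List String), K.Nodup → (∀ k ∈ K, k ∈ u) → o.length = u.length →
    (∀ j : Nat, j < u.length → o[j]? = some (if u.getD j "" ∈ S then specEl u j else "")) →
    ((K.map (fun k => (k, IdxsFrom 0 u k))).foldl
      (fun out p =>
        if 1 < p.2.length then
          (PySem.List.enumerate p.2 1).foldl
            (fun out q => PySem.List.pySetD out q.2 (p.1 ++ "_" ++ PySem.Int.toStr q.1)) out
        else
          match p.2 with
          | i :: _ => PySem.List.pySetD out i p.1
          | [] => out) o).length = u.length ∧
    (∀ j : Nat, j < u.length →
      ((K.map (fun k => (k, IdxsFrom 0 u k))).foldl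
        (fun out p =>
          if 1 < p.2.length then
            (PySem.List.enumerate p.2 1).foldl
              (fun out q => PySem.List.pySetD out q.2 (p.1 ++ "_" ++ PySem.Int.toStr q.1)) out
          else
            match p.2 with
            | i :: _ => PySem.List.pySetD out i p.1
            | [] => out) o)[j]?
      = some (if u.getD j "" ∈ S ∨ u.getD j "" ∈ K then specEl u j else "")) := by
  intro K
  induction K with
  | nil =>
    intro S o _ _ hlen hinit
    refine ⟨by simpa using hlen, ?_⟩
    intro j hj
    simpa using hinit j hj
  | cons k K' ih =>
    intro S o hnd hmem hlen hinit
    simp only [List.map_cons, List.foldl_cons]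
    have hstep := fun j hj => group_step u k (hmem k (List.mem_cons_self ..)) o hlen j hj
    have hstepl := stepB_length o (k, IdxsFrom 0 u k)
    obtain ⟨ihl, ihp⟩ := ih (k :: S) _ hnd.of_cons
      (fun k' hk' => hmem k' (List.mem_cons_of_mem _ hk'))
      (by rw [hstepl]; exact hlen)
      (by intro j hj
          rw [hstep j hj]
          by_cases hjk : u.getD j "" = k
          · rw [if_pos hjk]
            have : u.getD j "" ∈ k :: S := by rw [hjk]; exact List.mem_cons_self ..
            rw [if_pos this]
          · rw [if_neg hjk, hinit j hj]
            congr 1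
            exact if_congr (by simp only [List.mem_cons]; tauto) rfl rfl)
    refine ⟨ihl, ?_⟩
    intro j hj
    rw [ihp j hj]
    congr 1
    exact if_congr (by simp only [List.mem_cons]; tauto) rfl rfl

theorem B_eq_spec (names : List String) :
    fix_dup_names_alt names = spec (names.map PySem.Str.upper) := by
  set u := names.map PySem.Str.upper with hu
  show (((PySem.List.enumerate u 0).foldl
      (fun d p => d.modify p.2 [] (fun xs => xs ++ [p.1]))
      (PySem.Dict.empty : PySem.Dict String (List Int))).items.foldl
      (fun out p =>
        if 1 < p.2.length then
          (PySem.List.enumerate p.2 1).foldl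
            (fun out q => PySem.List.pySetD out q.2 (p.1 ++ "_" ++ PySem.Int.toStr q.1)) out
        else
          match p.2 with
          | i :: _ => PySem.List.pySetD out i p.1
          | [] => out)
      (List.replicate u.length "")) = spec u
  rw [items_posFold u]
  obtain ⟨hl, hp⟩ := scatter u (PySem.Set.ofList u) [] (List.replicate u.length "")
    (PySem.Set.nodup_ofList u)
    (fun k hk => (PySem.Set.mem_ofList _ _).mp hk)
    (by simp)
    (by intro j hj; simp [List.getElem?_replicate, hj])
  apply List.ext_getElem?
  intro i
  by_cases hi : i < u.length
  · rw [hp i hi]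
    have hmem : u.getD i "" ∈ u := by
      rw [List.getD_eq_getElem?_getD, List.getElem?_eq_getElem hi]
      exact List.getElem_mem hi
    rw [if_pos (Or.inr ((PySem.Set.mem_ofList _ _).mpr hmem))]
    simp [spec, List.getElem?_map, List.getElem?_range, hi]
  · rw [List.getElem?_eq_none (by rw [hl]; omega)]
    rw [eq_comm]
    apply List.getElem?_eq_none
    simp only [spec, List.length_map, List.length_range]
    omega

-- ===== VERDICT (by name: the statement is the Claim_ definition above) =====
theorem fix_dup_names_spec : Claim_equal_fix_dup_names := by
  intro names _
  show fix_dup_names names = fix_dup_names_alt names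
  rw [A_eq_spec, B_eq_spec]
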